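-- pv_equiv track=rewrite | github.com/setadrift/the-lineup | app/utils/data_cleaning.py | map_position
-- ===== SOURCE A (Python) =====
-- def map_position(position: str) -> str:
--     """
--     Standardize position mapping.
--
--     Args:
--         position (str): Raw position string
--
--     Returns:
--         str: Standardized position
--     """
--     position = position.upper().strip()
--
--     # Handle compound positions
--     if '-' in position:
--         pos1, pos2 = position.split('-')
--         return f"{map_position(pos1)}-{map_position(pos2)}"
--
--     position_map = {
--         'PG': 'PG',
--         'SG': 'SG',
--         'SF': 'SF',
--         'PF': 'PF',
--         'C': 'C',
--         'G': 'SG',  # Default guards to SG if not specified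
--         'F': 'SF',  # Default forwards to SF if not specified
--         'GUARD': 'SG',
--         'FORWARD': 'SF',
--         'CENTER': 'C'
--     }
--
--     return position_map.get(position, 'UNK')
-- ===== SOURCE B (Python) =====
-- def _norm(chars):
--     t = ''.join(chars).strip()
--     if t in ('PG', 'SG', 'SF', 'PF', 'C'):
--         return t
--     if t in ('G', 'GUARD'):
--         return 'SG'
--     if t in ('F', 'FORWARD'):
--         return 'SF'
--     if t == 'CENTER':
--         return 'C'
--     return 'UNK'
--
--
-- def map_position(position: str) -> str:
--     tokens = []
--     cur = []
--     for ch in position.upper().strip():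
--         if ch == '-':
--             tokens.append(_norm(cur))
--             cur = []
--         else:
--             cur.append(ch)
--     tokens.append(_norm(cur))
--     return '-'.join(tokens)
-- ===== Notes on version B (the rewrite author's own statement) =====
-- stated objective: alternative
-- what changed: Replaces A's recursive split-and-dispatch (split('-') with two-name unpacking plus a dict lookup per half) by a single left-to-right character scan with a token accumulator that flushes each dash-free token through a flat if/elif normalizer and joins the results with '-'.
-- crash fix: On inputs whose cleaned form contains two or more '-' characters A raises ValueError (unpacking split('-') into two names); B's scan simply normalizes every token, e.g. 'PG-SG-C' -> 'PG-SG-C'. — e.g. on map_position("PG-SG-C"): A raises ValueError, B returns "PG-SG-C"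
import Mathlib
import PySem

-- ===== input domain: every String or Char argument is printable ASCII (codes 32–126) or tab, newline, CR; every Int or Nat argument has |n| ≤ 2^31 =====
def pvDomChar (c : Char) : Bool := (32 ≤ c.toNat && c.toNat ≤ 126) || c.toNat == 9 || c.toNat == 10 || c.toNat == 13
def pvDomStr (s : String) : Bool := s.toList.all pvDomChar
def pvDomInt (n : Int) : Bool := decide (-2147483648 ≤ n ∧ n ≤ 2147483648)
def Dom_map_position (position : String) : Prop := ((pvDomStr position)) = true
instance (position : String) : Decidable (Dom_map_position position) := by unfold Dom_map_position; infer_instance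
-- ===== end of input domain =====

-- B replaces A's recursive split-and-dispatch (dict lookup per half) by one left-to-right
-- character scan with a token accumulator and a flat if/elif normalizer ('alternative');
-- on inputs whose cleaned form has ≥ 2 dashes A raises ValueError while B returns a value (see Raises_ block).

-- ===== PORT A =====
-- the dict literal position_map of A
def pvPositionMap : PySem.Dict String String :=
  PySem.Dict.mk [("PG", "PG"), ("SG", "SG"), ("SF", "SF"), ("PF", "PF"), ("C", "C"),
                 ("G", "SG"), ("F", "SF"), ("GUARD", "SG"), ("FORWARD", "SF"), ("CENTER", "C")]

-- A's body, with the recursive self-call abstracted as `rec`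
def pvMapPosBody (rec : String → String) (position : String) : String :=
  let p := PySem.Str.strip (PySem.Str.upper position)
  if PySem.Str.isIn "-" p then
    match PySem.Str.split? p "-" with
    | some [p1, p2] => rec p1 ++ "-" ++ rec p2
    | _ => ""  -- Python raises ValueError here (unpack of ≠ 2 parts); excluded by Pre_
  else pvPositionMap.getD p "UNK"

-- A's recursion, made total with a fuel guard (fuel 2 suffices: split('-') parts contain no '-')
def pvMapPositionFuel : Nat → String → String
  | 0, _ => ""  -- fuel guard only, never reached from fuel 2
  | Nat.succ n, position => pvMapPosBody (pvMapPositionFuel n) position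

def map_position (position : String) : String := pvMapPositionFuel 2 position

-- ===== PORT B =====
-- B's _norm: the flat if/elif chain on the stripped token
def pvChain (t : String) : String :=
  if t = "PG" ∨ t = "SG" ∨ t = "SF" ∨ t = "PF" ∨ t = "C" then t
  else if t = "G" ∨ t = "GUARD" then "SG"
  else if t = "F" ∨ t = "FORWARD" then "SF"
  else if t = "CENTER" then "C"
  else "UNK"

def pvNorm (cur : List Char) : String := pvChain (String.ofList (PySem.Chars.strip cur))

-- one step of B's character scan: flush the accumulated token on '-', else extend it
def pvStep (s : List String × List Char) (ch : Char) : List String × List Char :=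
  if ch = '-' then (s.1 ++ [pvNorm s.2], []) else (s.1, s.2 ++ [ch])

def map_position_alt (position : String) : String :=
  let st := (PySem.Str.strip (PySem.Str.upper position)).toList.foldl pvStep ([], [])
  PySem.Str.join "-" (st.1 ++ [pvNorm st.2])

-- ===== PRECONDITION & SPEC =====
-- Pre_ excludes exactly the inputs with two or more '-' characters, on which A's
-- 'pos1, pos2 = position.split('-')' raises ValueError (A returns nowhere outside Pre_).
def Pre_map_position (position : String) : Prop := PySem.Str.count position "-" ≤ 1
instance (position : String) : Decidable (Pre_map_position position) := by
  unfold Pre_map_position; infer_instance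

def pvWitness_map_position : String := "PG-SG"

-- On inputs with ≥ 2 '-' characters A raises ValueError; B's scan normalizes every token
-- and returns their join ('PG-SG-C' → 'PG-SG-C').
def Raises_map_position (position : String) : Prop := 2 ≤ PySem.Str.count position "-"
instance (position : String) : Decidable (Raises_map_position position) := by
  unfold Raises_map_position; infer_instance
def pvRaiseWitness_map_position : String := "PG-SG-C"
def pvRaiseWitnessOut_map_position : String := "PG-SG-C"

def Spec_map_position (position : String) (out : String) : Prop := out = map_position_alt position
instance (position : String) (out : String) : Decidable (Spec_map_position position out) := by
  unfold Spec_map_position; infer_instance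

-- ===== CLAIM (what is proved, stated in full; the proofs are below) =====
def Claim_equal_map_position : Prop := ∀ (position : String), Dom_map_position position → Pre_map_position position → Spec_map_position position (map_position position)
def Claim_raises_map_position : Prop := (∀ (position : String), Dom_map_position position → Raises_map_position position → ¬ Pre_map_position position) ∧ (Dom_map_position (pvRaiseWitness_map_position) ∧ Raises_map_position (pvRaiseWitness_map_position) ∧ map_position_alt (pvRaiseWitness_map_position) = pvRaiseWitnessOut_map_position)

-- ===== LEMMAS AND PROOFS =====

-- splitOn.go on ['-']
theorem pv_splitgo_no_dash (l : List Char) (h : '-' ∉ l) (fuel : Nat) (hf : l.length ≤ fuel)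
    (cur : List Char) (acc : List (List Char)) :
    PySem.Chars.splitOn.go ['-'] fuel l cur acc = acc.reverse ++ [cur.reverse ++ l] := by
  induction l generalizing fuel cur acc with
  | nil => cases fuel <;> simp [PySem.Chars.splitOn.go]
  | cons c t ih =>
    cases fuel with
    | zero => simp at hf
    | succ f =>
      simp only [List.mem_cons, not_or] at h
      rw [show PySem.Chars.splitOn.go ['-'] (f + 1) (c :: t) cur acc
          = PySem.Chars.splitOn.go ['-'] f t (c :: cur) acc from by
        simp [PySem.Chars.splitOn.go, List.isPrefixOf, h.1]]
      rw [ih h.2 f (by simp at hf ⊢; omega) (c :: cur) acc]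
      simp

theorem pv_splitgo_one_dash (a b : List Char) (ha : '-' ∉ a) (hb : '-' ∉ b) (fuel : Nat)
    (hf : a.length + 1 + b.length ≤ fuel) (cur : List Char) (acc : List (List Char)) :
    PySem.Chars.splitOn.go ['-'] fuel (a ++ '-' :: b) cur acc
      = acc.reverse ++ [cur.reverse ++ a, b] := by
  induction a generalizing fuel cur acc with
  | nil =>
    cases fuel with
    | zero => simp at hf
    | succ f =>
      rw [show PySem.Chars.splitOn.go ['-'] (f + 1) ([] ++ '-' :: b) cur acc
          = PySem.Chars.splitOn.go ['-'] f b [] (cur.reverse :: acc) from by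
        simp [PySem.Chars.splitOn.go, List.isPrefixOf]]
      rw [pv_splitgo_no_dash b hb f (by simp at hf ⊢; omega) [] (cur.reverse :: acc)]
      simp
  | cons c t ih =>
    cases fuel with
    | zero => simp at hf
    | succ f =>
      simp only [List.mem_cons, not_or] at ha
      rw [show PySem.Chars.splitOn.go ['-'] (f + 1) ((c :: t) ++ '-' :: b) cur acc
          = PySem.Chars.splitOn.go ['-'] f (t ++ '-' :: b) (c :: cur) acc from by
        simp [PySem.Chars.splitOn.go, List.isPrefixOf, ha.1]]
      rw [ih ha.2 f (by simp at hf ⊢; omega) (c :: cur) acc]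
      simp

-- count.go on ['-'] counts the character
theorem pv_countgo (l : List Char) (fuel acc : Nat) (hf : l.length ≤ fuel) :
    PySem.Chars.count.go ['-'] fuel l acc = acc + l.count '-' := by
  induction l generalizing fuel acc with
  | nil => cases fuel <;> simp [PySem.Chars.count.go]
  | cons c t ih =>
    cases fuel with
    | zero => simp at hf
    | succ f =>
      by_cases hc : c = '-'
      · subst hc
        rw [show PySem.Chars.count.go ['-'] (f + 1) ('-' :: t) acc
            = PySem.Chars.count.go ['-'] f t (acc + 1) from by
          simp [PySem.Chars.count.go, List.isPrefixOf]]
        rw [ih f (acc + 1) (by simp at hf; omega)]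
        simp [List.count_cons]; omega
      · rw [show PySem.Chars.count.go ['-'] (f + 1) (c :: t) acc
            = PySem.Chars.count.go ['-'] f t acc from by
          simp [PySem.Chars.count.go, List.isPrefixOf, Ne.symm hc]]
        rw [ih f acc (by simp at hf; omega)]
        simp [List.count_cons, hc]

theorem pv_str_count_dash (s : String) :
    PySem.Str.count s "-" = s.toList.count '-' := by
  have h := pv_countgo s.toList s.toList.length 0 le_rfl
  have hsub : ("-" : String).toList = ['-'] := rfl
  simp only [PySem.Str.count, hsub, PySem.Chars.count]
  simpa using h

-- upperChar sends only '-' to '-'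
theorem pv_upperChar_dash {c : Char} (h : PySem.Chars.upperChar c = '-') : c = '-' := by
  unfold PySem.Chars.upperChar PySem.Chars.islower at h
  split_ifs at h with hl
  · exfalso
    rw [Bool.and_eq_true, decide_eq_true_eq, decide_eq_true_eq] at hl
    have h97 : 97 ≤ c.toNat := hl.1
    have h122 : c.toNat ≤ 122 := hl.2
    have hv := congrArg Char.toNat h
    rw [Char.toNat_ofNat] at hv
    have hval : (c.toNat - 32).isValidChar := Or.inl (by omega)
    rw [if_pos hval] at hv
    have h45 : ('-').toNat = 45 := rfl
    omega
  · exact h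

-- upperChar never produces a lowercase letter, hence it is idempotent
theorem pv_islower_upperChar (c : Char) :
    PySem.Chars.islower (PySem.Chars.upperChar c) = false := by
  unfold PySem.Chars.upperChar
  split_ifs with hl
  · unfold PySem.Chars.islower at hl ⊢
    rw [Bool.and_eq_true, decide_eq_true_eq, decide_eq_true_eq] at hl
    have h97 : 97 ≤ c.toNat := hl.1
    have h122 : c.toNat ≤ 122 := hl.2
    have hval : (c.toNat - 32).isValidChar := Or.inl (by omega)
    have ht : (Char.ofNat (c.toNat - 32)).toNat = c.toNat - 32 := by
      rw [Char.toNat_ofNat, if_pos hval]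
    rw [Bool.and_eq_false_iff]
    left
    rw [decide_eq_false_iff_not]
    intro hle
    have h2 : 97 ≤ (Char.ofNat (c.toNat - 32)).toNat := hle
    omega
  · exact Bool.eq_false_iff.mpr hl

theorem pv_upperChar_idem (c : Char) :
    PySem.Chars.upperChar (PySem.Chars.upperChar c) = PySem.Chars.upperChar c := by
  conv_lhs => rw [PySem.Chars.upperChar]
  rw [pv_islower_upperChar]
  simp

-- membership transport through strip and upper
theorem pv_strip_sublist (cs : List Char) : (PySem.Chars.strip cs).Sublist cs := by
  unfold PySem.Chars.strip PySem.Chars.rstrip PySem.Chars.lstrip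
  have h1 : (List.dropWhile PySem.Chars.isspace cs).Sublist cs := List.dropWhile_sublist ..
  have h2 : (List.dropWhile PySem.Chars.isspace
      (List.dropWhile PySem.Chars.isspace cs).reverse).Sublist
      (List.dropWhile PySem.Chars.isspace cs).reverse := List.dropWhile_sublist ..
  have h3 := h2.reverse
  simp only [List.reverse_reverse] at h3
  exact h3.trans h1

theorem pv_mem_strip {x : Char} {cs : List Char} (h : x ∈ PySem.Chars.strip cs) : x ∈ cs :=
  (pv_strip_sublist cs).subset h

theorem pv_dash_count_upper (cs : List Char) :
    (PySem.Chars.upper cs).count '-' = cs.count '-' := by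
  induction cs with
  | nil => rfl
  | cons c t ih =>
    have ih' : List.count '-' (List.map PySem.Chars.upperChar t) = List.count '-' t := by
      simpa [PySem.Chars.upper] using ih
    by_cases hc : c = '-'
    · subst hc
      simp [PySem.Chars.upper, List.count_cons, ih',
            show PySem.Chars.upperChar '-' = '-' from by decide]
    · have hne : PySem.Chars.upperChar c ≠ '-' := fun hh => hc (pv_upperChar_dash hh)
      simp [PySem.Chars.upper, List.count_cons, hc, hne, ih']

theorem pv_dash_count_strip_le (cs : List Char) :
    (PySem.Chars.strip cs).count '-' ≤ cs.count '-' :=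
  (pv_strip_sublist cs).count_le '-'

-- every character of upper l is a fixed point of upperChar
theorem pv_mem_upper_fix {c : Char} {l : List Char} (h : c ∈ PySem.Chars.upper l) :
    PySem.Chars.upperChar c = c := by
  simp only [PySem.Chars.upper, List.mem_map] at h
  obtain ⟨c0, _, rfl⟩ := h
  exact pv_upperChar_idem c0

theorem pv_upper_fixed {l : List Char} (h : ∀ c ∈ l, PySem.Chars.upperChar c = c) :
    PySem.Chars.upper l = l := by
  unfold PySem.Chars.upper
  rw [List.map_congr_left h]
  simp

-- dropWhile is idempotent; strip is idempotent
theorem pv_dropWhile_idem (p : Char → Bool) (l : List Char) :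
    List.dropWhile p (List.dropWhile p l) = List.dropWhile p l := by
  induction l with
  | nil => simp
  | cons c t ih =>
    by_cases hc : p c = true
    · simp [List.dropWhile_cons, hc, ih]
    · simp [List.dropWhile_cons, hc]

theorem pv_rstrip_idem (l : List Char) :
    PySem.Chars.rstrip (PySem.Chars.rstrip l) = PySem.Chars.rstrip l := by
  unfold PySem.Chars.rstrip
  rw [List.reverse_reverse, pv_dropWhile_idem]

theorem pv_lstrip_rstrip_lstrip (l : List Char) :
    PySem.Chars.lstrip (PySem.Chars.rstrip (PySem.Chars.lstrip l))
      = PySem.Chars.rstrip (PySem.Chars.lstrip l) := by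
  have hpref : (PySem.Chars.rstrip (PySem.Chars.lstrip l)) <+: PySem.Chars.lstrip l := by
    unfold PySem.Chars.rstrip
    rw [← List.reverse_suffix, List.reverse_reverse]
    exact List.dropWhile_suffix _
  cases hv : PySem.Chars.rstrip (PySem.Chars.lstrip l) with
  | nil => simp [PySem.Chars.lstrip]
  | cons c rest =>
    rw [hv] at hpref
    obtain ⟨tail, htail⟩ := hpref
    have h2 : List.dropWhile PySem.Chars.isspace l = c :: (rest ++ tail) := by
      rw [show List.dropWhile PySem.Chars.isspace l = PySem.Chars.lstrip l from rfl,
          ← htail]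
      simp
    have hne : List.dropWhile PySem.Chars.isspace l ≠ [] := by rw [h2]; simp
    have hh := List.head_dropWhile_not PySem.Chars.isspace hne
    simp only [h2, List.head_cons] at hh
    unfold PySem.Chars.lstrip
    rw [List.dropWhile_cons, hh]
    simp

theorem pv_strip_idem (l : List Char) :
    PySem.Chars.strip (PySem.Chars.strip l) = PySem.Chars.strip l := by
  show PySem.Chars.rstrip (PySem.Chars.lstrip (PySem.Chars.strip l)) = PySem.Chars.strip l
  show PySem.Chars.rstrip (PySem.Chars.lstrip (PySem.Chars.rstrip (PySem.Chars.lstrip l)))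
      = PySem.Chars.rstrip (PySem.Chars.lstrip l)
  rw [pv_lstrip_rstrip_lstrip, pv_rstrip_idem]

-- B's if/elif chain is extensionally A's dict lookup
theorem pv_chain_getD (t : String) : pvChain t = pvPositionMap.getD t "UNK" := by
  unfold pvChain
  by_cases h1 : t = "PG" ∨ t = "SG" ∨ t = "SF" ∨ t = "PF" ∨ t = "C"
  · rcases h1 with rfl | rfl | rfl | rfl | rfl <;> decide
  · rw [if_neg h1]
    by_cases h2 : t = "G" ∨ t = "GUARD"
    · rcases h2 with rfl | rfl <;> decide
    · rw [if_neg h2]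
      by_cases h3 : t = "F" ∨ t = "FORWARD"
      · rcases h3 with rfl | rfl <;> decide
      · rw [if_neg h3]
        by_cases h4 : t = "CENTER"
        · subst h4; decide
        · rw [if_neg h4]
          push_neg at h1 h2 h3
          have e1 : (("PG" : String) == t) = false := beq_eq_false_iff_ne.mpr (Ne.symm h1.1)
          have e2 : (("SG" : String) == t) = false := beq_eq_false_iff_ne.mpr (Ne.symm h1.2.1)
          have e3 : (("SF" : String) == t) = false := beq_eq_false_iff_ne.mpr (Ne.symm h1.2.2.1)
          have e4 : (("PF" : String) == t) = false := beq_eq_false_iff_ne.mpr (Ne.symm h1.2.2.2.1)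
          have e5 : (("C" : String) == t) = false := beq_eq_false_iff_ne.mpr (Ne.symm h1.2.2.2.2)
          have e6 : (("G" : String) == t) = false := beq_eq_false_iff_ne.mpr (Ne.symm h2.1)
          have e7 : (("GUARD" : String) == t) = false := beq_eq_false_iff_ne.mpr (Ne.symm h2.2)
          have e8 : (("F" : String) == t) = false := beq_eq_false_iff_ne.mpr (Ne.symm h3.1)
          have e9 : (("FORWARD" : String) == t) = false := beq_eq_false_iff_ne.mpr (Ne.symm h3.2)
          have e10 : (("CENTER" : String) == t) = false := beq_eq_false_iff_ne.mpr (Ne.symm h4)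
          simp [pvPositionMap, PySem.Dict.getD, PySem.Dict.get?, PySem.Dict.items,
                List.find?, e1, e2, e3, e4, e5, e6, e7, e8, e9, e10]

-- B's scan over a dash-free block only extends the accumulator
theorem pv_fold_no_dash (l : List Char) (h : '-' ∉ l) (out : List String) (cur : List Char) :
    l.foldl pvStep (out, cur) = (out, cur ++ l) := by
  induction l generalizing cur with
  | nil => simp
  | cons c t ih =>
    simp only [List.mem_cons, not_or] at h
    rw [List.foldl_cons, show pvStep (out, cur) c = (out, cur ++ [c]) from by
      unfold pvStep
      rw [if_neg (fun hh => h.1 hh.symm)]]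
    rw [ih h.2 (cur ++ [c])]
    simp

-- '-'.join on one and two pieces
theorem pv_join_one (x : String) : PySem.Str.join "-" [x] = x := by
  unfold PySem.Str.join
  rw [List.map_singleton, PySem.Chars.join_singleton, String.ofList_toList]

theorem pv_join_two (x y : String) : PySem.Str.join "-" [x, y] = x ++ "-" ++ y := by
  rw [← String.toList_inj]
  rw [PySem.Str.toList_join]
  simp only [List.map_cons, List.map_nil, PySem.Chars.join_cons_cons, PySem.Chars.join_singleton]
  simp [String.toList_append]

-- one inner step of A on a fixed-point, dash-free token equals B's normalizer
theorem pv_token (t : List Char) (hnd : '-' ∉ t)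
    (hfix : ∀ c ∈ t, PySem.Chars.upperChar c = c) :
    pvMapPositionFuel 1 (String.ofList t) = pvNorm t := by
  have hup : PySem.Chars.upper t = t := pv_upper_fixed hfix
  have hPt : (PySem.Str.strip (PySem.Str.upper (String.ofList t))).toList
      = PySem.Chars.strip t := by simp [hup]
  have hnds : '-' ∉ PySem.Chars.strip t := fun hm => hnd (pv_mem_strip hm)
  have hisin_f : PySem.Str.isIn "-" (PySem.Str.strip (PySem.Str.upper (String.ofList t)))
      = false := by
    rw [Bool.eq_false_iff]
    intro hT
    rw [PySem.Str.isIn_iff_infix] at hT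
    rw [hPt] at hT
    have : ("-" : String).toList = ['-'] := rfl
    rw [this, List.singleton_infix_iff] at hT
    exact hnds hT
  rw [show pvMapPositionFuel 1 (String.ofList t)
      = pvMapPosBody (pvMapPositionFuel 0) (String.ofList t) from rfl]
  simp only [pvMapPosBody]
  rw [if_neg (by rw [hisin_f]; exact Bool.false_ne_true)]
  have hc := pv_chain_getD (String.ofList (PySem.Chars.strip t))
  rw [show pvNorm t = pvChain (String.ofList (PySem.Chars.strip t)) from rfl, hc]
  have hPeq : PySem.Str.strip (PySem.Str.upper (String.ofList t))
      = String.ofList (PySem.Chars.strip t) := by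
    rw [← String.ofList_toList
      (s := PySem.Str.strip (PySem.Str.upper (String.ofList t))), hPt]
  rw [hPeq]

theorem map_position_eq (position : String) (hpre : Pre_map_position position) :
    map_position position = map_position_alt position := by
  unfold Pre_map_position at hpre
  rw [pv_str_count_dash] at hpre
  have hcnt : (PySem.Chars.strip (PySem.Chars.upper position.toList)).count '-' ≤ 1 :=
    le_trans (le_trans (pv_dash_count_strip_le _) (le_of_eq (pv_dash_count_upper _))) hpre
  have hsub : ("-" : String).toList = ['-'] := rfl
  have hP : (PySem.Str.strip (PySem.Str.upper position)).toList
      = PySem.Chars.strip (PySem.Chars.upper position.toList) := by simp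
  have hfixC : ∀ c ∈ PySem.Chars.strip (PySem.Chars.upper position.toList),
      PySem.Chars.upperChar c = c := fun c hc => pv_mem_upper_fix (pv_mem_strip hc)
  rw [show map_position position = pvMapPosBody (pvMapPositionFuel 1) position from rfl]
  by_cases hd : '-' ∈ PySem.Chars.strip (PySem.Chars.upper position.toList)
  · obtain ⟨a, b, hab⟩ := List.append_of_mem hd
    have hcnt' := hcnt
    rw [hab] at hcnt'
    simp only [List.count_append, List.count_cons_self] at hcnt'
    have hna : '-' ∉ a := List.count_eq_zero.mp (by omega)
    have hnb : '-' ∉ b := List.count_eq_zero.mp (by omega)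
    have hfa : ∀ c ∈ a, PySem.Chars.upperChar c = c := fun c hc =>
      hfixC c (by rw [hab]; exact List.mem_append_left _ hc)
    have hfb : ∀ c ∈ b, PySem.Chars.upperChar c = c := fun c hc =>
      hfixC c (by rw [hab]; exact List.mem_append_right _ (List.mem_cons_of_mem _ hc))
    have hisin : PySem.Str.isIn "-" (PySem.Str.strip (PySem.Str.upper position)) = true := by
      rw [PySem.Str.isIn_iff_infix, hsub, hP, List.singleton_infix_iff]
      exact hd
    have hsplit : PySem.Chars.splitOn (PySem.Chars.strip (PySem.Chars.upper position.toList)) ['-']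
        = [a, b] := by
      unfold PySem.Chars.splitOn
      rw [hab]
      have := pv_splitgo_one_dash a b hna hnb ((a ++ '-' :: b).length + 1)
        (by simp [List.length_append]; omega) [] []
      simpa using this
    have hsplitS : PySem.Str.split? (PySem.Str.strip (PySem.Str.upper position)) "-"
        = some [String.ofList a, String.ofList b] := by
      unfold PySem.Str.split?
      rw [hsub, hP]
      rw [show PySem.Chars.split? (PySem.Chars.strip (PySem.Chars.upper position.toList)) ['-']
          = some (PySem.Chars.splitOn (PySem.Chars.strip (PySem.Chars.upper position.toList)) ['-'])
          from rfl]
      rw [hsplit]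
      rfl
    have hred : pvMapPosBody (pvMapPositionFuel 1) position
        = pvMapPositionFuel 1 (String.ofList a) ++ "-" ++ pvMapPositionFuel 1 (String.ofList b) := by
      simp only [pvMapPosBody]
      rw [if_pos hisin, hsplitS]
    rw [hred, pv_token a hna hfa, pv_token b hnb hfb]
    show pvNorm a ++ "-" ++ pvNorm b = map_position_alt position
    simp only [map_position_alt]
    rw [hP, hab, List.foldl_append, pv_fold_no_dash a hna [] [], List.foldl_cons]
    rw [show pvStep ([], [] ++ a) '-' = ([pvNorm ([] ++ a)], []) from by simp [pvStep]]
    rw [pv_fold_no_dash b hnb [pvNorm ([] ++ a)] []]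
    simp only [List.nil_append]
    simp only [List.singleton_append]
    rw [pv_join_two]
  · have hisin_f : PySem.Str.isIn "-" (PySem.Str.strip (PySem.Str.upper position)) = false := by
      rw [Bool.eq_false_iff]
      intro hT
      rw [PySem.Str.isIn_iff_infix, hsub, hP, List.singleton_infix_iff] at hT
      exact hd hT
    simp only [pvMapPosBody]
    rw [if_neg (by rw [hisin_f]; exact Bool.false_ne_true)]
    simp only [map_position_alt]
    rw [hP, pv_fold_no_dash _ hd [] []]
    simp only [List.nil_append]
    rw [pv_join_one]
    rw [show pvNorm (PySem.Chars.strip (PySem.Chars.upper position.toList))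
        = pvChain (String.ofList (PySem.Chars.strip (PySem.Chars.strip (PySem.Chars.upper position.toList)))) from rfl]
    rw [pv_strip_idem, pv_chain_getD]
    have hPeq : PySem.Str.strip (PySem.Str.upper position)
        = String.ofList (PySem.Chars.strip (PySem.Chars.upper position.toList)) := by
      rw [← String.ofList_toList (s := PySem.Str.strip (PySem.Str.upper position)), hP]
    rw [hPeq]

-- ===== VERDICT (by name: the statement is the Claim_ definition above) =====
theorem map_position_spec : Claim_equal_map_position := by
  intro position _ hpre
  unfold Spec_map_position
  exact map_position_eq position hpre

@[simp]
theorem map_position_raises : Claim_raises_map_position := by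
  unfold Claim_raises_map_position
  constructor
  · intro position _ h hpre
    unfold Raises_map_position at h
    unfold Pre_map_position at hpre
    omega
  · refine ⟨by decide, by decide, by decide⟩
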